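-- pv_equiv track=rewrite | github.com/akankshaKatoch/DSAPracticeAndNotes | DataStructurePractice/MyPractice/LongestSubstringwith1 replacement.py | mycode
-- ===== SOURCE A (Python) =====
-- def mycode(s, k):
--     maxwin = 0
--
--
--     for i in range(len(s)):
--         left = i
--         right = i+1
--         counter = k
--         winlen = 1
--         while right<len(s):
--             if s[left] == s[right]:
--                 winlen += 1
--                 right +=1
--             elif s[left] != s[right] and counter>0:
--                 winlen +=1
--                 counter -=1
--                 right+=1
--             else:
--                 break
--         maxwin = max(winlen, maxwin)
--
--
--
--     return maxwin
-- ===== SOURCE B (Python) =====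
-- def mycode(s, k):
--     # One pass with precomputed per-character mismatch-position lists:
--     # window from i = distance to the (kp+1)-th position differing from s[i].
--     kp = k if k > 0 else 0
--     n = len(s)
--     diff = {c: [p for p, ch in enumerate(s) if ch != c] for c in set(s)}
--     cnt = {}
--     best = 0
--     for i, c in enumerate(s):
--         m = diff[c]
--         r = i - cnt.get(c, 0)          # mismatch positions before i w.r.t. c
--         j = m[r + kp] if r + kp < len(m) else n
--         if j - i > best:
--             best = j - i
--         cnt[c] = cnt.get(c, 0) + 1
--     return best
-- ===== Notes on version B (the rewrite author's own statement) =====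
-- stated objective: faster
-- what changed: A rescans the string from every start index with an inner while loop; B precomputes, per distinct character c, the sorted list of positions differing from c, plus a running occurrence counter, so the window end from each start is a single list index lookup (the (k+1)-th differing position).
import Mathlib
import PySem

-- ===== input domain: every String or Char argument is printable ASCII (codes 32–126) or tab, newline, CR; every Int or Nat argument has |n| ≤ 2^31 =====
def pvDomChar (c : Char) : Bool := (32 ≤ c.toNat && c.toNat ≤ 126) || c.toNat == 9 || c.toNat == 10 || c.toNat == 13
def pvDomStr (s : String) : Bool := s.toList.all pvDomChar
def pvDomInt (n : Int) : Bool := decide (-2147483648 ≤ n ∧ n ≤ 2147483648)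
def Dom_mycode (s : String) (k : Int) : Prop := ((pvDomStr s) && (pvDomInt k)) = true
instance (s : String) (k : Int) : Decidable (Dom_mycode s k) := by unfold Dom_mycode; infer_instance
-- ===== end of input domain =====

-- B replaces A's quadratic per-start rescans by precomputed per-character mismatch-position
-- lists indexed directly (window from i ends at the (k+1)-th position differing from s[i]); faster.

-- ===== PORT A =====
-- inner 'while right < len(s)' loop of A; c is s[left] (left is fixed at i)
def mycodeInner (l : List Char) (c : Char) (right : Nat) (counter : Int) (winlen : Int) : Int :=
  if h : right < l.length then
    if l[right] = c then mycodeInner l c (right + 1) counter (winlen + 1)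
    else if 0 < counter then mycodeInner l c (right + 1) (counter - 1) (winlen + 1)
    else winlen
  else winlen
termination_by l.length - right

def mycode (s : String) (k : Int) : Int :=
  (List.range s.toList.length).foldl
    (fun maxwin i => max (mycodeInner s.toList (s.toList.getD i ' ') (i + 1) k 1) maxwin) 0

-- ===== PORT B =====
-- [p for p, ch in enumerate(s) if ch != c]
def mismList (l : List Char) (c : Char) : List Int :=
  ((PySem.List.enumerate l).filter (fun pc => pc.2 ≠ c)).map (fun pc => pc.1)

-- body of B's 'for i, c in enumerate(s)' loop; state = (cnt, best)
def bStep (diff : PySem.Dict Char (List Int)) (kp : Int) (n : Int)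
    (st : PySem.Dict Char Int × Int) (ic : Int × Char) : PySem.Dict Char Int × Int :=
  let m := (diff.get? ic.2).getD []
  let r := ic.1 - st.1.getD ic.2 0
  let j := if r + kp < (m.length : Int) then m.getD (r + kp).toNat 0 else n
  (st.1.insert ic.2 (st.1.getD ic.2 0 + 1), if j - ic.1 > st.2 then j - ic.1 else st.2)

def mycode_alt (s : String) (k : Int) : Int :=
  let l := s.toList
  let kp : Int := if k > 0 then k else 0
  let diff := (PySem.Set.ofList l).foldl
    (fun d c => PySem.Dict.insert d c (mismList l c)) PySem.Dict.empty
  ((PySem.List.enumerate l).foldl (bStep diff kp (l.length : Int))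
    (PySem.Dict.empty, 0)).2

-- ===== PRECONDITION & SPEC =====
def Spec_mycode (s : String) (k : Int) (out : Int) : Prop := out = mycode_alt s k
instance (s : String) (k : Int) (out : Int) : Decidable (Spec_mycode s k out) := by unfold Spec_mycode; infer_instance

-- ===== CLAIM (what is proved, stated in full; the proofs are below) =====
def Claim_equal_mycode : Prop := ∀ (s : String) (k : Int), Dom_mycode s k → Spec_mycode s k (mycode s k)

-- ===== LEMMAS AND PROOFS =====

-- positions p ≥ r (as Ints) with l[p] ≠ c
def misms (l : List Char) (c : Char) (r : Nat) : List Int :=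
  ((List.range' r (l.length - r)).filter (fun p => l.getD p ' ' ≠ c)).map (fun p => (p : Int))

-- where A's inner loop stops: the (counter+1)-th mismatch position after r, or len(l)
def stopAt (l : List Char) (c : Char) (r : Nat) (counter : Int) : Int :=
  ((misms l c r)[counter.toNat]?).getD (l.length : Int)

-- the window length from start i that both programs compute
def vals (l : List Char) (k : Int) (i : Nat) : Int :=
  stopAt l (l.getD i ' ') (i + 1) k - i

lemma inner_eq (l : List Char) (c : Char) :
    ∀ (fuel r : Nat), l.length - r = fuel → r ≤ l.length → ∀ (counter w : Int),
      mycodeInner l c r counter w = w + stopAt l c r counter - r := by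
  intro fuel
  induction fuel with
  | zero =>
    intro r h hr counter w
    have hrn : r = l.length := by omega
    subst hrn
    rw [mycodeInner]
    simp [stopAt, misms]
  | succ fuel ih =>
    intro r h hr counter w
    have hr' : r < l.length := by omega
    have hrange : List.range' r (l.length - r) = r :: List.range' (r + 1) (l.length - (r + 1)) := by
      have hh : l.length - r = (l.length - (r + 1)) + 1 := by omega
      rw [hh, List.range'_succ]
    have hgq : l[r]?.getD ' ' = l[r] := by simp [List.getElem?_eq_getElem hr']
    rw [mycodeInner, dif_pos hr']
    by_cases hc : l[r] = c
    · rw [if_pos hc, ih (r + 1) (by omega) (by omega)]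
      have hst : stopAt l c r counter = stopAt l c (r + 1) counter := by
        unfold stopAt misms
        rw [hrange]
        simp [List.getD, hgq, hc]
      rw [hst]; push_cast; ring
    · rw [if_neg hc]
      have hm : misms l c r = (r : Int) :: misms l c (r + 1) := by
        unfold misms
        rw [hrange]
        simp [List.getD, hgq, hc]
      by_cases hcnt : 0 < counter
      · rw [if_pos hcnt, ih (r + 1) (by omega) (by omega)]
        have hst : stopAt l c r counter = stopAt l c (r + 1) (counter - 1) := by
          unfold stopAt
          rw [hm]
          have ht : counter.toNat = (counter - 1).toNat + 1 := by omega
          rw [ht]; simp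
        rw [hst]; push_cast; ring
      · rw [if_neg hcnt]
        have hst : stopAt l c r counter = (r : Int) := by
          unfold stopAt
          rw [hm]
          have ht : counter.toNat = 0 := by omega
          rw [ht]; simp
        rw [hst]; ring

lemma enum_drop (L : List Char) (c : Char) :
    ∀ (fuel s : Nat), L.length - s = fuel → s ≤ L.length →
      ((PySem.List.enumerate (L.drop s) (s : Int)).filter (fun pc => pc.2 ≠ c)).map (fun pc => pc.1)
        = misms L c s := by
  intro fuel
  induction fuel with
  | zero =>
    intro s h hs
    have hsn : s = L.length := by omega
    subst hsn
    simp [PySem.List.enumerate_nil, misms]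
  | succ fuel ih =>
    intro s h hs
    have hs' : s < L.length := by omega
    have hdrop : L.drop s = L[s] :: L.drop (s + 1) := List.drop_eq_getElem_cons hs'
    have hrange : List.range' s (L.length - s) = s :: List.range' (s + 1) (L.length - (s + 1)) := by
      have hh : L.length - s = (L.length - (s + 1)) + 1 := by omega
      rw [hh, List.range'_succ]
    have hgq : L[s]?.getD ' ' = L[s] := by simp [List.getElem?_eq_getElem hs']
    have hcast : (s : Int) + 1 = ((s + 1 : Nat) : Int) := by push_cast; ring
    have ih' := ih (s + 1) (by omega) (by omega)
    unfold misms at ih' ⊢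
    rw [hdrop, PySem.List.enumerate_cons, hcast, hrange]
    by_cases hc : L[s] = c
    · simpa [List.filter_cons, List.getD, hgq, hc] using ih'
    · simpa [List.filter_cons, List.getD, hgq, hc] using ih'

lemma mismList_eq (l : List Char) (c : Char) : mismList l c = misms l c 0 := by
  have h := enum_drop l c l.length 0 (by omega) (by omega)
  simpa [mismList] using h

lemma diff_get (l : List Char) (c : Char) (hc : c ∈ l) :
    (((PySem.Set.ofList l).foldl
      (fun d c => PySem.Dict.insert d c (mismList l c)) PySem.Dict.empty).get? c)
      = some (mismList l c) := by
  have gen : ∀ (cs : List Char) (d : PySem.Dict Char (List Int)) (c : Char),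
      (c ∈ cs ∨ d.get? c = some (mismList l c)) →
      ((cs.foldl (fun d c => PySem.Dict.insert d c (mismList l c)) d).get? c)
        = some (mismList l c) := by
    intro cs
    induction cs with
    | nil => intro d c h; simpa using h
    | cons a rest ih =>
      intro d c h
      simp only [List.foldl_cons]
      apply ih
      by_cases hcr : c ∈ rest
      · exact Or.inl hcr
      · right
        rcases h with h | h
        · have hca : c = a := by
            rcases List.mem_cons.mp h with h' | h'
            · exact h'
            · exact absurd h' hcr
          subst hca
          exact PySem.Dict.get?_insert_self _ _ _
        · by_cases hca : c = a
          · subst hca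
            exact PySem.Dict.get?_insert_self _ _ _
          · rw [PySem.Dict.get?_insert_of_ne _ _ hca]
            exact h
  exact gen _ _ _ (Or.inl ((PySem.Set.mem_ofList l c).mpr hc))

lemma misms_split (l : List Char) (i : Nat) (hi : i < l.length) :
    misms l (l.getD i ' ') 0
      = ((List.range' 0 i).filter (fun p => l.getD p ' ' ≠ l.getD i ' ')).map (fun p => (p : Int))
        ++ misms l (l.getD i ' ') (i + 1) := by
  unfold misms
  have h1 : List.range' 0 l.length = List.range' 0 i ++ List.range' i (l.length - i) := by
    have := @List.range'_append 0 i (l.length - i) 1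
    symm
    simpa [show i + (l.length - i) = l.length by omega] using this
  have h2 : List.range' i (l.length - i) = i :: List.range' (i + 1) (l.length - (i + 1)) := by
    have hh : l.length - i = (l.length - (i + 1)) + 1 := by omega
    rw [hh, List.range'_succ]
  simp only [Nat.sub_zero]
  rw [h1, h2, List.filter_append, List.filter_cons]
  simp

lemma count_le (l : List Char) (c : Char) (i : Nat) : (l.take i).count c ≤ i := by
  calc (l.take i).count c ≤ (l.take i).length := List.count_le_length
    _ ≤ i := by simp [List.length_take]

lemma pre_len (l : List Char) (c : Char) :
    ∀ i, i ≤ l.length →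
      (l.take i).count c + ((List.range' 0 i).filter (fun p => l.getD p ' ' ≠ c)).length = i := by
  intro i
  induction i with
  | zero => simp
  | succ i ihh =>
    intro hi
    have hi' : i < l.length := by omega
    have ih := ihh (by omega)
    have hg? : l[i]? = some l[i] := List.getElem?_eq_getElem hi'
    have hgq : l[i]?.getD ' ' = l[i] := by simp [hg?]
    rw [List.range'_1_concat, List.filter_append, List.take_add_one, hg?, List.length_append,
        List.count_append]
    simp only [Nat.zero_add, Option.toList_some]
    by_cases hc : l[i] = c
    · have h1 : (List.filter (fun p => decide (l.getD p ' ' ≠ c)) [i]).length = 0 := by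
        simp [hgq, hc]
      have h2 : List.count c [l[i]] = 1 := by simp [hc]
      rw [h1, h2]
      omega
    · have h1 : (List.filter (fun p => decide (l.getD p ' ' ≠ c)) [i]).length = 1 := by
        simp [hgq, hc]
      have h2 : List.count c [l[i]] = 0 := by
        rw [List.count_eq_zero]
        simp only [List.mem_singleton]
        exact fun h => hc h.symm
      rw [h1, h2]
      omega

lemma bfold (L : List Char) (k : Int) :
    ∀ (fuel s : Nat), L.length - s = fuel → s ≤ L.length →
      ∀ (cnt : PySem.Dict Char Int) (best : Int),
      (∀ ch, cnt.getD ch 0 = ((L.take s).count ch : Int)) →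
      ((PySem.List.enumerate (L.drop s) (s : Int)).foldl
        (bStep ((PySem.Set.ofList L).foldl
          (fun d c => PySem.Dict.insert d c (mismList L c)) PySem.Dict.empty)
          (if k > 0 then k else 0) (L.length : Int)) (cnt, best)).2
      = (List.range' s (L.length - s)).foldl (fun mw i => max (vals L k i) mw) best := by
  intro fuel
  induction fuel with
  | zero =>
    intro s h hs cnt best hcnt
    have hsn : s = L.length := by omega
    subst hsn
    simp [PySem.List.enumerate_nil]
  | succ fuel ih =>
    intro s h hs cnt best hcnt
    have hs' : s < L.length := by omega
    have hdrop : L.drop s = L[s] :: L.drop (s + 1) := List.drop_eq_getElem_cons hs'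
    have hmem : L[s] ∈ L := List.getElem_mem hs'
    have hdg := diff_get L L[s] hmem
    have hgetD : L.getD s ' ' = L[s] := List.getD_eq_getElem L ' ' hs'
    have hsplit := misms_split L s hs'
    rw [hgetD] at hsplit
    have hplen := pre_len L L[s] s (by omega)
    have hcle : (L.take s).count L[s] ≤ s := count_le L L[s] s
    -- abbreviations
    set c := L[s] with hcdef
    set P := ((List.range' 0 s).filter (fun p => L.getD p ' ' ≠ c)).map (fun p => (p : Int)) with hP
    set M := misms L c (s + 1) with hM
    have hPlen : P.length = ((List.range' 0 s).filter (fun p => L.getD p ' ' ≠ c)).length := by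
      rw [hP]; simp
    -- one fold step
    rw [hdrop, PySem.List.enumerate_cons, List.foldl_cons]
    have hkp : (0 : Int) ≤ (if k > 0 then k else 0) := by split <;> omega
    have hkpt : (if k > 0 then k else 0).toNat = k.toNat := by split <;> omega
    -- the step value
    have hr : (s : Int) - cnt.getD c 0 = (P.length : Int) := by
      rw [hcnt c, hPlen]
      omega
    have hm : ((((PySem.Set.ofList L).foldl
        (fun d c => PySem.Dict.insert d c (mismList L c)) PySem.Dict.empty).get? c).getD [])
        = P ++ M := by
      rw [hdg, Option.getD_some, mismList_eq, hsplit]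
    have hj : (if (s : Int) - cnt.getD c 0 + (if k > 0 then k else 0)
          < (((((PySem.Set.ofList L).foldl
            (fun d c => PySem.Dict.insert d c (mismList L c)) PySem.Dict.empty).get? c).getD []).length : Int)
        then ((((PySem.Set.ofList L).foldl
            (fun d c => PySem.Dict.insert d c (mismList L c)) PySem.Dict.empty).get? c).getD []).getD
          ((s : Int) - cnt.getD c 0 + (if k > 0 then k else 0)).toNat 0
        else (L.length : Int)) = stopAt L c (s + 1) k := by
      rw [hm, hr]
      have hlen : ((P ++ M).length : Int) = (P.length : Int) + (M.length : Int) := by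
        rw [List.length_append]; push_cast; ring
      have htn : ((P.length : Int) + (if k > 0 then k else 0)).toNat = P.length + k.toNat := by
        omega
      by_cases hin : k.toNat < M.length
      · rw [if_pos (by rw [hlen]; omega), htn]
        have hgd : (P ++ M).getD (P.length + k.toNat) 0 = M.getD k.toNat 0 := by
          simp only [List.getD]
          rw [List.getElem?_append_right (by omega)]
          simp
        rw [hgd]
        unfold stopAt
        rw [← hM, List.getElem?_eq_getElem hin]
        simp [List.getD, List.getElem?_eq_getElem hin]
      · rw [if_neg (by rw [hlen]; omega)]
        unfold stopAt
        rw [← hM, List.getElem?_eq_none (by omega)]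
        simp
    -- the new counter satisfies the invariant at s+1
    have hcnt' : ∀ ch, (cnt.insert c (cnt.getD c 0 + 1)).getD ch 0 = ((L.take (s + 1)).count ch : Int) := by
      intro ch
      rw [PySem.Dict.getD_insert]
      rw [List.take_add_one, List.getElem?_eq_getElem hs']
      simp only [Option.toList_some, List.count_append]
      by_cases hch : ch = c
      · rw [if_pos hch, hch, hcnt c]
        have h1 : List.count c [L[s]] = 1 := by simp [← hcdef]
        rw [h1]
        push_cast; ring
      · rw [if_neg hch, hcnt ch]
        have : List.count ch [L[s]] = 0 := by
          rw [List.count_eq_zero]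
          simp only [List.mem_singleton]
          exact fun hh => hch (by rw [hh, hcdef])
        rw [this]
        push_cast; ring
    -- apply the induction hypothesis
    have hcast : (s : Int) + 1 = ((s + 1 : Nat) : Int) := by push_cast; ring
    have hih := ih (s + 1) (by omega) (by omega) (cnt.insert c (cnt.getD c 0 + 1))
      (if stopAt L c (s + 1) k - (s : Int) > best then stopAt L c (s + 1) k - (s : Int) else best) hcnt'
    -- rewrite the step into bStep's unfolding
    show ((PySem.List.enumerate (L.drop (s + 1)) ((s : Int) + 1)).foldl _
        (bStep _ _ _ (cnt, best) ((s : Int), c))).2 = _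
    have hbstep : bStep ((PySem.Set.ofList L).foldl
          (fun d c => PySem.Dict.insert d c (mismList L c)) PySem.Dict.empty)
          (if k > 0 then k else 0) (L.length : Int) (cnt, best) ((s : Int), c)
        = (cnt.insert c (cnt.getD c 0 + 1),
           if stopAt L c (s + 1) k - (s : Int) > best then stopAt L c (s + 1) k - (s : Int) else best) := by
      unfold bStep
      dsimp only
      rw [hj]
    rw [hbstep, hcast, hih]
    -- fold the range' on the RHS
    have hrange : List.range' s (L.length - s) = s :: List.range' (s + 1) (L.length - (s + 1)) := by
      have hh : L.length - s = (L.length - (s + 1)) + 1 := by omega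
      rw [hh, List.range'_succ]
    rw [hrange, List.foldl_cons]
    have hv : vals L k s = stopAt L c (s + 1) k - (s : Int) := by
      unfold vals
      rw [hgetD]
    rw [hv]
    have : (if stopAt L c (s + 1) k - (s : Int) > best then stopAt L c (s + 1) k - (s : Int) else best)
        = max (stopAt L c (s + 1) k - (s : Int)) best := by
      split <;> omega
    rw [this]


-- ===== VERDICT (by name: the statement is the Claim_ definition above) =====
theorem mycode_spec : Claim_equal_mycode := by
  intro str k _
  unfold Spec_mycode mycode mycode_alt
  rw [List.range_eq_range']
  have hA : (List.range' 0 str.toList.length).foldl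
      (fun maxwin i => max (mycodeInner str.toList (str.toList.getD i ' ') (i + 1) k 1) maxwin) 0
    = (List.range' 0 str.toList.length).foldl (fun mw i => max (vals str.toList k i) mw) 0 := by
    apply List.foldl_ext
    intro b a ha
    have halen : a < str.toList.length := by
      have := List.mem_range'_1.mp ha
      omega
    have hv : mycodeInner str.toList (str.toList.getD a ' ') (a + 1) k 1 = vals str.toList k a := by
      rw [inner_eq str.toList _ (str.toList.length - (a + 1)) (a + 1) rfl (by omega) k 1]
      unfold vals
      push_cast
      ring
    rw [hv]
  rw [hA]
  have hB := bfold str.toList k str.toList.length 0 (by omega) (by omega) PySem.Dict.empty 0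
    (by intro ch; simp [PySem.Dict.getD_empty])
  simp only [List.drop_zero, Nat.cast_zero, Nat.sub_zero] at hB
  rw [hB]
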